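-- pv_equiv track=rewrite | github.com/StfnC/chad-finance | chad_finance/api/models.py | get_data_from_date_window
-- ===== SOURCE A (Python) =====
-- def get_data_from_date_window(data, start_date):
--     """
--     Nettoie un dictionnaire pour obtenir seulement les donnees a partir d'une certaine date
--
--     Args:
--         data (dict): Dictionnaire contenant les donnees provenant de l'api
--         start_date (string): Date de debut
--
--     Returns:
--         dict: Dictionnaire qui contient les valeurs de la periode voulue
--     """
--     # TODO: Handle les cas lorsque le end_date n'est pas dans les donnees
--     # Liste ordonnees des dates contenues dans les donnees
--     key_list = list(data.keys())
--     end_date_index = 0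
--     start_date_index = key_list.index(start_date)
--
--     # On recupere les dates qui se trouvent entre les deux dates
--     sub_keys = [key_list[x]
--                 for x in range(end_date_index, start_date_index + 1)]
--
--     # On construit un nouveau dictionnaire avec les dates qui nous interessent
--     data_range = {key: data[key] for key in sub_keys}
--
--     return data_range
-- ===== SOURCE B (Python) =====
-- def get_data_from_date_window(data, start_date):
--     """Single pass: accumulate entries in order and stop once start_date is included."""
--     window = {}
--     for key, value in data.items():
--         window[key] = value
--         if key == start_date:
--             return window
--     raise ValueError(f"'{start_date}' is not in list")
-- ===== Notes on version B (the rewrite author's own statement) =====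
-- stated objective: simpler
-- what changed: Replaces A's three passes (build the key list, list.index scan, rebuild a key range and look each key up again in the dict) by one traversal of data.items() that copies entries and returns as soon as start_date has been copied.
import Mathlib
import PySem

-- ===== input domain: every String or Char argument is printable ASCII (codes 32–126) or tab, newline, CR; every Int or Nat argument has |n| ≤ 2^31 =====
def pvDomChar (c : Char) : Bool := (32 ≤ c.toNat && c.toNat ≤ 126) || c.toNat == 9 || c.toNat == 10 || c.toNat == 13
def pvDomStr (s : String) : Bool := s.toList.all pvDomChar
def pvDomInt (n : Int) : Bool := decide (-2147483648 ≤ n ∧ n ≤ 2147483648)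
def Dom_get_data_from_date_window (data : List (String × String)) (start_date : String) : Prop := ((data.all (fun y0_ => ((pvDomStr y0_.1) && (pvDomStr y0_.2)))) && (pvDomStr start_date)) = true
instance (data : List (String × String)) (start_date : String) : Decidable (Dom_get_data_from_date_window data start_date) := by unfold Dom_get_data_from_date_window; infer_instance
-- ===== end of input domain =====

-- B replaces A's find-index-then-rebuild passes by one accumulate-until-found traversal of the items (same O(n) cost, plainer).

-- ===== PORT A =====
-- the argument assoc list models a Python dict: PySem.Dict.ofList reproduces dict construction (last value wins, first position)
def get_data_from_date_window (data : List (String × String)) (start_date : String) : List (String × String) :=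
  -- key_list = list(data.keys()); end_date_index = 0; start_date_index = key_list.index(start_date)
  match PySem.List.index? (PySem.Dict.ofList data).keys start_date with
  | none => []   -- Python raises ValueError here; excluded by Pre_
  | some start_date_index =>
    -- sub_keys = [key_list[x] for x in range(end_date_index, start_date_index + 1)]
    -- data_range = {key: data[key] for key in sub_keys}
    (((PySem.List.pyRange 0 ((start_date_index : Int) + 1)).map
        (fun x => PySem.List.pyGetD (PySem.Dict.ofList data).keys x "")).foldl
      (fun dr key => dr.insert key ((PySem.Dict.ofList data).getD key "")) PySem.Dict.empty).items

-- ===== PORT B =====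
def pvAltGo (start_date : String) (window : PySem.Dict String String) :
    List (String × String) → List (String × String)
  | [] => []   -- Python raises ValueError here; excluded by Pre_
  | (k, v) :: rest =>
    let window' := window.insert k v
    if k == start_date then window'.items else pvAltGo start_date window' rest

def get_data_from_date_window_alt (data : List (String × String)) (start_date : String) : List (String × String) :=
  pvAltGo start_date PySem.Dict.empty (PySem.Dict.ofList data).items

-- ===== PRECONDITION & SPEC =====
-- Pre_ excludes exactly the inputs whose dict lacks start_date as a key: there A's list.index (and B) raises ValueError.
def Pre_get_data_from_date_window (data : List (String × String)) (start_date : String) : Prop :=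
  start_date ∈ data.map Prod.fst
instance (data : List (String × String)) (start_date : String) : Decidable (Pre_get_data_from_date_window data start_date) := by unfold Pre_get_data_from_date_window; infer_instance

def pvWitness_get_data_from_date_window : (List (String × String)) × String :=
  ([("2020-01-01", "1"), ("2020-01-02", "2"), ("2020-01-03", "3")], "2020-01-02")

def Spec_get_data_from_date_window (data : List (String × String)) (start_date : String) (out : List (String × String)) : Prop := out = get_data_from_date_window_alt data start_date
instance (data : List (String × String)) (start_date : String) (out : List (String × String)) : Decidable (Spec_get_data_from_date_window data start_date out) := by unfold Spec_get_data_from_date_window; infer_instance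

-- ===== CLAIM (what is proved, stated in full; the proofs are below) =====
def Claim_equal_get_data_from_date_window : Prop := ∀ (data : List (String × String)) (start_date : String), Dom_get_data_from_date_window data start_date → Pre_get_data_from_date_window data start_date → Spec_get_data_from_date_window data start_date (get_data_from_date_window data start_date)

-- ===== LEMMAS AND PROOFS =====

theorem pv_mem_keys_ofList (ps : List (String × String)) (k : String) :
    k ∈ (PySem.Dict.ofList ps).keys ↔ k ∈ ps.map Prod.fst := by
  show k ∈ (List.foldl (fun acc p => acc.insert p.1 p.2) PySem.Dict.empty ps).keys ↔ _
  rw [PySem.Dict.keys_foldl_insert_key ps (fun p => p.1) (fun _ p => p.2) PySem.Dict.empty]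
  rw [PySem.Dict.keys_empty]
  simp [PySem.Set.mem_update]

theorem pv_map_getD_range (K : List String) (n : Nat) (h : n ≤ K.length) :
    (List.range n).map (fun k => K.getD k "") = K.take n := by
  induction n with
  | zero => simp
  | succ m ih =>
    rw [List.range_succ, List.map_append, ih (by omega), List.take_add_one]
    simp [List.getD, List.getElem?_eq_getElem (by omega : m < K.length)]

theorem pv_altGo_take (sd : String) :
    ∀ (L : List (String × String)) (acc : PySem.Dict String String) (i : Nat),
      (acc.keys ++ L.map Prod.fst).Nodup →
      PySem.List.index? (L.map Prod.fst) sd = some i →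
      pvAltGo sd acc L = acc.items ++ L.take (i + 1) := by
  intro L
  induction L with
  | nil => intro acc i _ hidx; simp [PySem.List.index?] at hidx
  | cons p rest ih =>
    intro acc i hnd hidx
    obtain ⟨k, v⟩ := p
    have hk_not : k ∉ acc.keys := by
      intro hk
      have hdisj := (List.nodup_append.mp hnd).2.2
      exact hdisj k hk k (by simp) rfl
    have hcont : acc.contains k = false := by
      rcases h : acc.contains k with _ | _
      · rfl
      · exact absurd ((PySem.Dict.contains_iff_mem_keys acc k).mp h) hk_not
    by_cases hks : k = sd
    · subst hks
      have h0 : PySem.List.index? (k :: rest.map Prod.fst) k = some 0 :=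
        PySem.List.index?_cons_self _ _
      simp only [List.map_cons] at hidx
      rw [h0] at hidx
      obtain rfl : i = 0 := by injection hidx with h'; omega
      simp [pvAltGo, PySem.Dict.items_insert_of_not_contains acc v hcont]
    · simp only [List.map_cons] at hidx
      rw [PySem.List.index?_cons_of_ne _ (fun h => hks h)] at hidx
      rcases h2 : PySem.List.index? (rest.map Prod.fst) sd with _ | m
      · rw [h2] at hidx; simp at hidx
      · rw [h2] at hidx
        simp only [Option.map_some] at hidx
        injection hidx with h3
        have hnd' : ((acc.insert k v).keys ++ rest.map Prod.fst).Nodup := by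
          rw [PySem.Dict.keys_insert_of_not_contains acc v hcont]
          simpa using hnd
        have hrec := ih (acc.insert k v) m hnd' h2
        have hstep : pvAltGo sd acc ((k, v) :: rest) = pvAltGo sd (acc.insert k v) rest := by
          simp [pvAltGo, hks]
        rw [hstep, hrec, PySem.Dict.items_insert_of_not_contains acc v hcont]
        subst h3
        simp [List.take_succ_cons]

theorem pv_portA_take (data : List (String × String)) (sd : String) (i : Nat)
    (hidx : PySem.List.index? (PySem.Dict.ofList data).keys sd = some i) :
    get_data_from_date_window data sd = (PySem.Dict.ofList data).items.take (i + 1) := by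
  set d := PySem.Dict.ofList data with hd
  have hnd : d.keys.Nodup := PySem.Dict.nodup_keys_ofList data
  obtain ⟨hk, _, _⟩ := PySem.List.getElem_of_index?_eq_some hidx
  unfold get_data_from_date_window
  rw [← hd]
  rw [hidx]
  have hsub : (PySem.List.pyRange 0 ((i : Int) + 1)).map (fun x => PySem.List.pyGetD d.keys x "")
      = d.keys.take (i + 1) := by
    rw [PySem.List.pyRange_one, List.map_map]
    have : ((i : Int) + 1 - 0).toNat = i + 1 := by omega
    rw [this]
    have : (fun k : Nat => PySem.List.pyGetD d.keys (0 + (k : Int)) "")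
        = (fun k : Nat => d.keys.getD k "") := by
      funext k; simp [PySem.List.pyGetD_natCast]
    rw [Function.comp_def]
    simp only [zero_add, PySem.List.pyGetD_natCast]
    exact pv_map_getD_range d.keys (i + 1) (by omega)
  simp only [hsub]
  have hfold := PySem.Dict.items_foldl_insert_fresh (d.keys.take (i + 1))
      (fun a => a) (fun a => d.getD a "") PySem.Dict.empty
      (by intro a _; simp [PySem.Dict.contains_empty])
      (by simpa using hnd.sublist (List.take_sublist _ _))
  simp only [hfold]
  have hempty : (PySem.Dict.empty : PySem.Dict String String).items = [] := rfl
  rw [hempty, List.nil_append,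
      PySem.Dict.items_eq_map_keys d hnd "", ← List.map_take]

-- ===== VERDICT (by name: the statement is the Claim_ definition above) =====
theorem get_data_from_date_window_spec : Claim_equal_get_data_from_date_window := by
  intro data sd _ hpre
  unfold Spec_get_data_from_date_window
  set d := PySem.Dict.ofList data with hd
  have hmem : sd ∈ d.keys := (pv_mem_keys_ofList data sd).mpr hpre
  have hsome : (PySem.List.index? d.keys sd).isSome = true :=
    (PySem.List.index?_isSome_iff d.keys sd).mpr hmem
  rcases hidx : PySem.List.index? d.keys sd with _ | i
  · rw [hidx] at hsome; simp at hsome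
  · have hA := pv_portA_take data sd i (by rw [← hd]; exact hidx)
    have hndk : d.keys.Nodup := PySem.Dict.nodup_keys_ofList data
    have hB := pv_altGo_take sd d.items PySem.Dict.empty i
      (by rw [PySem.Dict.keys_empty, List.nil_append]; exact hndk)
      (by exact hidx)
    rw [hA]
    unfold get_data_from_date_window_alt
    rw [← hd, hB]
    rfl
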